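-- pv_equiv track=rewrite | github.com/Web-Star-Studio/daton-esg | backend/app/services/docx_export_service.py | _family_order
-- ===== SOURCE A (Python) =====
-- from typing import Any
--
-- def _family_order(rows: list[dict[str, Any]]) -> list[str]:
--     families_seen: list[str] = []
--     preferred = ["2", "3", "200", "300", "400"]
--     grouped = {row.get("family") or "outros" for row in rows}
--     for family in preferred:
--         if family in grouped:
--             families_seen.append(family)
--     for family in sorted(grouped):
--         if family not in preferred:
--             families_seen.append(family)
--     return families_seen
-- ===== SOURCE B (Python) =====
-- def _family_order(rows):
--     preferred = ["2", "3", "200", "300", "400"]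
--     families = {row.get("family") or "outros" for row in rows}
--     return sorted(
--         families,
--         key=lambda f: (preferred.index(f) if f in preferred else len(preferred), f),
--     )
-- ===== Notes on version B (the rewrite author's own statement) =====
-- stated objective: simpler
-- what changed: A's two explicit passes (a probe loop over the preferred list plus a filtered loop over the sorted rest) are replaced by a single keyed sort of the distinct families using the composite key (preferred.index(f) if preferred else len(preferred), f).
import Mathlib
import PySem

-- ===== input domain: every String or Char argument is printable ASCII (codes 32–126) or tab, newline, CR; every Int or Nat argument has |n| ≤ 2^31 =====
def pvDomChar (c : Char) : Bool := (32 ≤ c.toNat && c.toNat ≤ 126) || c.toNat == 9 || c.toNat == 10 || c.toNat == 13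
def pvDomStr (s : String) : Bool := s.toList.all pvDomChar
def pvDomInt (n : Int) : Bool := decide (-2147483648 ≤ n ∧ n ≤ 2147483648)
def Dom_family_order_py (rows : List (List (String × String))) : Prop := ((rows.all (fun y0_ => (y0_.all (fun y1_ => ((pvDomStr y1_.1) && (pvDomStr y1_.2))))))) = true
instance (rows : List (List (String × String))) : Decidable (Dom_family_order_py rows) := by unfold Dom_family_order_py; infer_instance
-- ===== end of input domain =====

-- B replaces A's two explicit passes (preferred-order probe + filtered sorted rest) by a single
-- keyed sort of the distinct families with a composite (rank, name) key; objective: simpler.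

-- shared helpers (identical lines in both Pythons)
def pvPreferred : List String := ["2", "3", "200", "300", "400"]

-- row.get("family") or "outros"  (missing key or empty string → "outros")
def pvFam (row : List (String × String)) : String :=
  match PySem.Dict.get? (PySem.Dict.mk row) "family" with
  | some s => if s = "" then "outros" else s
  | none => "outros"

-- ===== PORT A =====
def family_order_py (rows : List (List (String × String))) : List String :=
  let preferred := pvPreferred
  let grouped : PySem.Set String := PySem.Set.ofList (rows.map pvFam)
  let seen1 := preferred.foldl
    (fun acc family => if PySem.Set.contains grouped family then acc ++ [family] else acc) []
  (PySem.List.sorted grouped (fun x => x) false).foldl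
    (fun acc family => if !preferred.contains family then acc ++ [family] else acc) seen1

-- ===== PORT B =====
-- key=lambda f: (preferred.index(f) if f in preferred else len(preferred), f)
-- ported with the tuple ordered lexicographically (ℕ ×ₗ String), exactly Python's tuple order
def pvKey (f : String) : ℕ ×ₗ String :=
  toLex (((PySem.List.index? pvPreferred f).getD pvPreferred.length), f)

def family_order_py_alt (rows : List (List (String × String))) : List String :=
  PySem.List.sorted (PySem.Set.ofList (rows.map pvFam)) pvKey false

-- ===== PRECONDITION & SPEC =====
def Spec_family_order_py (rows : List (List (String × String))) (out : List String) : Prop := out = family_order_py_alt rows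
instance (rows : List (List (String × String))) (out : List String) : Decidable (Spec_family_order_py rows out) := by unfold Spec_family_order_py; infer_instance

-- ===== CLAIM (what is proved, stated in full; the proofs are below) =====
def Claim_equal_family_order_py : Prop := ∀ (rows : List (List (String × String))), Dom_family_order_py rows → Spec_family_order_py rows (family_order_py rows)

-- ===== LEMMAS AND PROOFS =====

-- A's result, written as two filters
theorem pvA_eq_filters (rows : List (List (String × String))) :
    family_order_py rows =
      (pvPreferred.filter (fun f => PySem.Set.contains (PySem.Set.ofList (rows.map pvFam)) f)) ++
      ((PySem.List.sorted (PySem.Set.ofList (rows.map pvFam)) (fun x => x) false).filter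
        (fun f => !pvPreferred.contains f)) := by
  unfold family_order_py
  rw [PySem.List.foldl_append_if_eq_filter, PySem.List.foldl_append_if_eq_filter]
  simp only [List.nil_append]

theorem pvRank_lt_of_mem (f : String) (h : f ∈ pvPreferred) :
    ((PySem.List.index? pvPreferred f).getD pvPreferred.length) < pvPreferred.length := by
  fin_cases h <;> decide

theorem pvRank_of_not_mem (f : String) (h : f ∉ pvPreferred) :
    ((PySem.List.index? pvPreferred f).getD pvPreferred.length) = pvPreferred.length := by
  rw [(PySem.List.index?_eq_none_iff pvPreferred f).mpr h]
  rfl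

theorem pvKey_lt_of_mem_of_not_mem (a b : String) (ha : a ∈ pvPreferred) (hb : b ∉ pvPreferred) :
    pvKey a < pvKey b := by
  unfold pvKey
  rw [Prod.Lex.toLex_lt_toLex]
  exact Or.inl ((pvRank_of_not_mem b hb).symm ▸ pvRank_lt_of_mem a ha)

theorem pvKey_lt_of_not_mem_of_lt (a b : String) (ha : a ∉ pvPreferred) (hb : b ∉ pvPreferred)
    (hlt : a < b) : pvKey a < pvKey b := by
  unfold pvKey
  rw [Prod.Lex.toLex_lt_toLex]
  right
  exact ⟨by rw [pvRank_of_not_mem a ha, pvRank_of_not_mem b hb], hlt⟩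

theorem pvPreferred_pairwise_key : pvPreferred.Pairwise (fun a b => pvKey a < pvKey b) := by
  decide

-- the two filtered blocks of A, pairwise strictly key-increasing and a permutation of the set
theorem pvMain (rows : List (List (String × String))) :
    family_order_py rows = family_order_py_alt rows := by
  set g : List String := PySem.Set.ofList (rows.map pvFam) with hg
  have hgnd : g.Nodup := PySem.Set.nodup_ofList (rows.map pvFam)
  set P : List String := pvPreferred.filter (fun f => PySem.Set.contains g f) with hP
  set R : List String :=
    (PySem.List.sorted g (fun x => x) false).filter (fun f => !pvPreferred.contains f) with hR
  have hA : family_order_py rows = P ++ R := pvA_eq_filters rows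
  -- membership facts
  have hPmem : ∀ f, f ∈ P ↔ (f ∈ pvPreferred ∧ f ∈ g) := by
    intro f
    simp [hP, List.mem_filter]
  have hRmem : ∀ f, f ∈ R ↔ (f ∈ g ∧ f ∉ pvPreferred) := by
    intro f
    simp [hR, List.mem_filter, PySem.List.mem_sorted]
  -- nodup
  have hnd : (P ++ R).Nodup := by
    refine List.Nodup.append ?_ ?_ ?_
    · exact List.Nodup.filter _ (by decide)
    · exact List.Nodup.filter _ ((PySem.List.sorted_perm g (fun x => x) false).nodup_iff.mpr hgnd)
    · intro f hf1 hf2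
      exact ((hRmem f).mp hf2).2 ((hPmem f).mp hf1).1
  -- permutation
  have hperm : (P ++ R).Perm g := by
    rw [List.perm_ext_iff_of_nodup hnd hgnd]
    intro f
    by_cases hfp : f ∈ pvPreferred <;> simp [List.mem_append, hPmem, hRmem, hfp]
  -- strictly increasing under pvKey
  have hpw : (P ++ R).Pairwise (fun a b => pvKey a < pvKey b) := by
    rw [List.pairwise_append]
    refine ⟨List.Pairwise.filter _ pvPreferred_pairwise_key, ?_, ?_⟩
    · have hR0 : R.Pairwise (fun a b : String => a < b) :=
        List.Pairwise.filter _ (PySem.List.sorted_ofList_pairwise_lt (rows.map pvFam))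
      refine hR0.imp_of_mem ?_
      intro a b ha hb hlt
      exact pvKey_lt_of_not_mem_of_lt a b ((hRmem a).mp ha).2 ((hRmem b).mp hb).2 hlt
    · intro a ha b hb
      exact pvKey_lt_of_mem_of_not_mem a b ((hPmem a).mp ha).1 ((hRmem b).mp hb).2
  have := PySem.List.sorted_eq_of_perm_of_pairwise_lt g (P ++ R) pvKey hperm hpw
  rw [hA, family_order_py_alt, ← hg, this]

-- ===== VERDICT (by name: the statement is the Claim_ definition above) =====
theorem family_order_py_spec : Claim_equal_family_order_py := by
  intro rows _
  exact pvMain rows
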